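-- pv_equiv track=rewrite | github.com/Yannnyan/Flappy | utils.py | closestPipeInd
-- ===== SOURCE A (Python) =====
-- import math
--
-- def closestPipeInd(pipes, xBird):
--         """
--         finds the next pipe to the birds
--         """
--         min_ind = 0
--         min_val = math.inf
--         for pipe_ind in range(len(pipes)):
--             xPipe = pipes[pipe_ind]['x']
--             cur_val = abs(xPipe - xBird)
--             # checks if the pipe is ahead of the bird and the pipe is the closest
--             if  xPipe > xBird and cur_val < min_val:
--                 min_ind = pipe_ind
--                 min_val = cur_val
--         return min_ind
-- ===== SOURCE B (Python) =====
-- def closestPipeInd(pipes, xBird):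
--     """
--     finds the next pipe to the birds
--     """
--     order = sorted(range(len(pipes)), key=lambda i: pipes[i]['x'])
--     for i in order:
--         if pipes[i]['x'] > xBird:
--             return i
--     return 0
-- ===== Notes on version B (the rewrite author's own statement) =====
-- stated objective: alternative
-- what changed: A's single fused scan tracking a running (min_ind, min_val) pair with an inf sentinel is replaced by sort-then-scan: stably sort the indices by pipe x, then return the first sorted index whose pipe is ahead of the bird (stability makes ties keep the smallest index, matching A's keep-first rule).
import Mathlib
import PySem

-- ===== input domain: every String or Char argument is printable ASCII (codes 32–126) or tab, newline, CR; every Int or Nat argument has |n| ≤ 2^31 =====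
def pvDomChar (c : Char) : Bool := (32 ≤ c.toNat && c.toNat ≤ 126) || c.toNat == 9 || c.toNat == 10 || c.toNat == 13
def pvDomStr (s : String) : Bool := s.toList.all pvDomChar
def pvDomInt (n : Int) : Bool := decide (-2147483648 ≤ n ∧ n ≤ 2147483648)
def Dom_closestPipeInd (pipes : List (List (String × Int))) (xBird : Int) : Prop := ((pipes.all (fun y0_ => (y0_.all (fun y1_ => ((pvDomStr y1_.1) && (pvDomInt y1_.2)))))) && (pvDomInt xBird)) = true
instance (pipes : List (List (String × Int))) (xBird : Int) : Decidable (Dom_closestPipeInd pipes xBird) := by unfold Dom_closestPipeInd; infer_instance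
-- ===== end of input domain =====

-- B replaces A's fused min-tracking scan by sort-then-scan: stably sort the indices by pipe x,
-- then return the first sorted index whose pipe is ahead of the bird (else 0); objective: alternative.

-- ===== PORT A =====
-- pipes[i]['x'] : the pipe dict looked up at key "x" (Pre_ guarantees the key is present, so
-- getD's default 0 is never reached on admitted inputs; index i comes from range, always valid).
def pvPipeX (pipes : List (List (String × Int))) (i : Int) : Int :=
  (PySem.Dict.ofList (PySem.List.pyGetD pipes i [])).getD "x" 0

-- literal port of A's loop: state = (min_ind, min_val); min_val = none models math.inf
def closestPipeInd (pipes : List (List (String × Int))) (xBird : Int) : Int :=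
  ((PySem.List.pyRange 0 (pipes.length : Int) 1).foldl
    (fun (st : Int × Option Int) pipe_ind =>
      let xPipe := pvPipeX pipes pipe_ind
      let cur_val := |xPipe - xBird|
      if decide (xPipe > xBird) && st.2.all (fun mv => decide (cur_val < mv)) then
        (pipe_ind, some cur_val)
      else st)
    (0, none)).1

-- ===== PORT B =====
-- order = sorted(range(len(pipes)), key=lambda i: pipes[i]['x']); the for-loop with an early
-- return is the first element of order satisfying the guard (List.find?), else the trailing 0.
def closestPipeInd_alt (pipes : List (List (String × Int))) (xBird : Int) : Int :=
  ((PySem.List.sorted (PySem.List.pyRange 0 (pipes.length : Int) 1)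
      (fun i => pvPipeX pipes i) false).find?
    (fun i => decide (pvPipeX pipes i > xBird))).getD 0

-- ===== PRECONDITION & SPEC =====
-- Pre_ excludes exactly the inputs on which A raises KeyError: a pipe dict without key "x".
def Pre_closestPipeInd (pipes : List (List (String × Int))) (xBird : Int) : Prop :=
  ∀ p ∈ pipes, "x" ∈ p.map (·.1)
instance (pipes : List (List (String × Int))) (xBird : Int) : Decidable (Pre_closestPipeInd pipes xBird) := by unfold Pre_closestPipeInd; infer_instance
def pvWitness_closestPipeInd : (List (List (String × Int))) × Int :=
  ([[("x", 5)], [("x", 2)], [("x", -3)]], 1)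

def Spec_closestPipeInd (pipes : List (List (String × Int))) (xBird : Int) (out : Int) : Prop := out = closestPipeInd_alt pipes xBird
instance (pipes : List (List (String × Int))) (xBird : Int) (out : Int) : Decidable (Spec_closestPipeInd pipes xBird out) := by unfold Spec_closestPipeInd; infer_instance

-- ===== CLAIM (what is proved, stated in full; the proofs are below) =====
def Claim_equal_closestPipeInd : Prop := ∀ (pipes : List (List (String × Int))) (xBird : Int), Dom_closestPipeInd pipes xBird → Pre_closestPipeInd pipes xBird → Spec_closestPipeInd pipes xBird (closestPipeInd pipes xBird)

-- ===== LEMMAS AND PROOFS =====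

-- Once A's loop has seen an ahead pipe (state (m, some (x m - b))), the rest of the loop is
-- exactly the keep-first argmin min?(m :: candidates, key).
theorem pvFoldSome (x : Int → Int) (b : Int) :
    ∀ (l : List Int) (m : Int), x m > b →
    l.foldl
      (fun (st : Int × Option Int) pipe_ind =>
        let xPipe := x pipe_ind
        let cur_val := |xPipe - b|
        if decide (xPipe > b) && st.2.all (fun mv => decide (cur_val < mv)) then
          (pipe_ind, some cur_val)
        else st)
      (m, some (x m - b))
    = (((PySem.List.min? (m :: l.filter (fun i => decide (x i > b))) (fun i => x i - b)).getD 0),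
       some (x ((PySem.List.min? (m :: l.filter (fun i => decide (x i > b))) (fun i => x i - b)).getD 0) - b)) := by
  intro l
  induction l with
  | nil => intro m hm; simp [PySem.List.min?]
  | cons i t ih =>
    intro m hm
    by_cases hg : x i > b
    · have habs : |x i - b| = x i - b := abs_of_pos (by omega)
      have hgd : decide (x i > b) = true := decide_eq_true hg
      by_cases hc : x i - b < x m - b
      · simp only [List.foldl_cons, List.filter_cons, hgd, habs, Option.all_some,
          Bool.true_and, hc, decide_true, PySem.List.min?, if_true]
        have := ih i hg
        simp only [PySem.List.min?, List.foldl_cons] at this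
        exact this
      · have hcd : decide (x i - b < x m - b) = false := decide_eq_false hc
        simp only [List.foldl_cons, List.filter_cons, hgd, habs, Option.all_some,
          Bool.true_and, if_false, if_true, PySem.List.min?, hc]
        have := ih m hm
        simp only [PySem.List.min?, List.foldl_cons] at this
        exact this
    · have hgd : decide (x i > b) = false := decide_eq_false hg
      simp only [List.foldl_cons, List.filter_cons, hgd, Bool.false_and, Bool.false_eq_true,
        if_false]
      exact ih m hm

-- From the initial state (0, none) (min_val = inf): A's loop skips indices until the first
-- ahead pipe, then pvFoldSome takes over; getD 0 mirrors B's fall-through return 0.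
theorem pvFoldNone (x : Int → Int) (b : Int) :
    ∀ (l : List Int),
    l.foldl
      (fun (st : Int × Option Int) pipe_ind =>
        let xPipe := x pipe_ind
        let cur_val := |xPipe - b|
        if decide (xPipe > b) && st.2.all (fun mv => decide (cur_val < mv)) then
          (pipe_ind, some cur_val)
        else st)
      (0, none)
    = ((PySem.List.min? (l.filter (fun i => decide (x i > b))) (fun i => x i - b)).getD 0,
       (PySem.List.min? (l.filter (fun i => decide (x i > b))) (fun i => x i - b)).map
         (fun m' => x m' - b)) := by
  intro l
  induction l with
  | nil => simp [PySem.List.min?]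
  | cons i t ih =>
    by_cases hg : x i > b
    · have habs : |x i - b| = x i - b := abs_of_pos (by omega)
      have hgd : decide (x i > b) = true := decide_eq_true hg
      simp only [List.foldl_cons, List.filter_cons, hgd, habs, Option.all_none,
        Bool.and_true, if_true]
      rw [pvFoldSome x b t i hg]
      obtain ⟨c, hc⟩ : ∃ c, PySem.List.min? (i :: t.filter (fun j => decide (x j > b)))
          (fun j => x j - b) = some c := by
        cases hM : PySem.List.min? (i :: t.filter (fun j => decide (x j > b))) (fun j => x j - b) with
        | none => exact absurd ((PySem.List.min?_eq_none_iff _ _).mp hM) (List.cons_ne_nil _ _)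
        | some c => exact ⟨c, rfl⟩
      rw [hc]
      simp
    · have hgd : decide (x i > b) = false := decide_eq_false hg
      simp only [List.foldl_cons, List.filter_cons, hgd, Bool.false_and, Bool.false_eq_true,
        if_false]
      exact ih

-- Inserting a into the x-sorted scan list: the first ahead element of the result is a itself
-- exactly when a is ahead and strictly x-below the previous first ahead element.
theorem pvInsertFind (x : Int → Int) (b : Int) (a : Int) :
    ∀ (s : List Int),
    List.find? (fun i => decide (x i > b))
      (PySem.List.insertBy (fun u v => decide (x u < x v)) a s)
    = match List.find? (fun i => decide (x i > b)) s with
      | none => if x a > b then some a else none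
      | some m => if x a > b ∧ x a < x m then some a else some m := by
  intro s
  induction s with
  | nil =>
    by_cases hpa : x a > b <;>
      simp [PySem.List.insertBy, List.find?, decide_eq_true, hpa]
  | cons y t ih =>
    by_cases hlt : x a < x y
    · -- a is inserted in front of y
      by_cases hpy : x y > b
      · by_cases hpa : x a > b <;>
          simp [PySem.List.insertBy, hlt, hpa, hpy]
      · have hnpa : ¬ x a > b := by omega
        simp only [PySem.List.insertBy, decide_eq_true_eq, hlt, if_true, List.find?_cons,
          decide_eq_false hnpa, decide_eq_false hpy]
        cases List.find? (fun i => decide (x i > b)) t <;> simp [hnpa]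
    · -- a goes past y
      by_cases hpy : x y > b
      · have : ¬ (x a > b ∧ x a < x y) := by omega
        simp [PySem.List.insertBy, hlt, hpy]
      · simp only [PySem.List.insertBy, decide_eq_true_eq, hlt, if_false,
          List.find?_cons, decide_eq_false hpy]
        exact ih

-- min? over a list with one element appended: one more comparator step.
theorem pvMinAppend (key : Int → Int) (ys : List Int) (a : Int) :
    PySem.List.min? (ys ++ [a]) key
    = match PySem.List.min? ys key with
      | none => some a
      | some m => if key a < key m then some a else some m := by
  cases hE : PySem.List.min? ys key <;>
    (simp only [PySem.List.min?, List.foldl_append, List.foldl_cons, List.foldl_nil]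
     simp only [PySem.List.min?] at hE
     rw [hE])

-- Core correspondence: the first ahead element of the stably x-sorted list is the keep-first
-- argmin of distance over the ahead elements of the original list.
theorem pvSortedFind (x : Int → Int) (b : Int) :
    ∀ (l : List Int),
    List.find? (fun i => decide (x i > b)) (PySem.List.sorted l (fun i => x i) false)
    = PySem.List.min? (l.filter (fun i => decide (x i > b))) (fun i => x i - b) := by
  intro l
  induction l using List.reverseRecOn with
  | nil => simp [PySem.List.sorted, PySem.List.min?]
  | append_singleton t a ih =>
    have hsort : PySem.List.sorted (t ++ [a]) (fun i => x i) false
        = PySem.List.insertBy (fun u v => decide (x u < x v)) a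
            (PySem.List.sorted t (fun i => x i) false) := by
      rw [PySem.List.sorted_eq_foldl_insertBy, PySem.List.sorted_eq_foldl_insertBy,
        List.foldl_append, List.foldl_cons, List.foldl_nil]
    rw [hsort, pvInsertFind, ih, List.filter_append]
    by_cases hpa : x a > b
    · simp only [List.filter_cons, List.filter_nil, decide_eq_true hpa, if_true,
        pvMinAppend]
      cases hM : PySem.List.min? (t.filter (fun i => decide (x i > b))) (fun i => x i - b) with
      | none => simp [hpa]
      | some m =>
        by_cases hc : x a < x m
        · have : x a > b ∧ x a < x m := ⟨hpa, hc⟩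
          have hc' : x a - b < x m - b := by omega
          simp [this, hc']
        · have : ¬ (x a > b ∧ x a < x m) := by omega
          have hc' : ¬ (x a - b < x m - b) := by omega
          simp [this, hc']
    · simp only [List.filter_cons, List.filter_nil, decide_eq_false hpa,
        Bool.false_eq_true, if_false, List.append_nil]
      cases hM : PySem.List.min? (t.filter (fun i => decide (x i > b))) (fun i => x i - b) with
      | none => simp [hpa]
      | some m =>
        have : ¬ (x a > b ∧ x a < x m) := by omega
        simp [this]

-- ===== VERDICT (by name: the statement is the Claim_ definition above) =====
theorem closestPipeInd_spec : Claim_equal_closestPipeInd := by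
  intro pipes xBird _ _
  unfold Spec_closestPipeInd closestPipeInd closestPipeInd_alt
  rw [pvFoldNone (pvPipeX pipes) xBird (PySem.List.pyRange 0 (pipes.length : Int) 1)]
  rw [pvSortedFind (pvPipeX pipes) xBird (PySem.List.pyRange 0 (pipes.length : Int) 1)]
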